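-- pv_equiv track=rewrite | github.com/dskiser/Probability-Simulations | idiotsdelight_evolution.py | check_cards
-- ===== SOURCE A (Python) =====
-- def check_cards(played_cards, discarded_cards):
-- 	'''determines if cards can be removed'''
-- 	if len(played_cards) >= 4:
-- 		last_card = list(played_cards[-1])
-- 		last_card_suite = last_card[0]
-- 		last_card_number = last_card[1]
-- 		fourth_card = list(played_cards[-4])
-- 		fourth_card_suite = fourth_card[0]
-- 		fourth_card_number = fourth_card[1]
-- 		if last_card_number == fourth_card_number:
-- 			discarded_cards.append(played_cards[-4])
-- 			discarded_cards.append(played_cards[-3])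
-- 			discarded_cards.append(played_cards[-2])
-- 			discarded_cards.append(played_cards[-1])
-- 			del played_cards[-4:]
-- 		elif last_card_suite == fourth_card_suite:
-- 			discarded_cards.append(played_cards[-3])
-- 			discarded_cards.append(played_cards[-2])
-- 			del played_cards[-3:-1]
-- 			check_cards(played_cards, discarded_cards)
-- 	return played_cards, discarded_cards
-- ===== SOURCE B (Python) =====
-- def check_cards(played_cards, discarded_cards):
--     '''determines if cards can be removed'''
--     # iterative version working on a reversed copy (last card first); mutates the
--     # same list objects to the same final states as the original
--     rev = played_cards[::-1]
--     while len(rev) >= 4: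
--         suite, number = rev[0]
--         fourth_suite, fourth_number = rev[3]
--         if number == fourth_number:
--             discarded_cards.extend([rev[3], rev[2], rev[1], rev[0]])
--             rev = rev[4:]
--             break
--         elif suite == fourth_suite:
--             discarded_cards.extend([rev[2], rev[1]])
--             rev = [rev[0]] + rev[3:]
--         else:
--             break
--     played_cards[:] = rev[::-1]
--     return played_cards, discarded_cards
-- ===== Notes on version B (the rewrite author's own statement) =====
-- stated objective: simpler
-- what changed: Replaces the tail recursion and repeated negative-index/slice-deletion bookkeeping with a single while loop over a reversed copy that inspects the four newest cards at the head and rebuilds the list once at the end.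
import Mathlib
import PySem

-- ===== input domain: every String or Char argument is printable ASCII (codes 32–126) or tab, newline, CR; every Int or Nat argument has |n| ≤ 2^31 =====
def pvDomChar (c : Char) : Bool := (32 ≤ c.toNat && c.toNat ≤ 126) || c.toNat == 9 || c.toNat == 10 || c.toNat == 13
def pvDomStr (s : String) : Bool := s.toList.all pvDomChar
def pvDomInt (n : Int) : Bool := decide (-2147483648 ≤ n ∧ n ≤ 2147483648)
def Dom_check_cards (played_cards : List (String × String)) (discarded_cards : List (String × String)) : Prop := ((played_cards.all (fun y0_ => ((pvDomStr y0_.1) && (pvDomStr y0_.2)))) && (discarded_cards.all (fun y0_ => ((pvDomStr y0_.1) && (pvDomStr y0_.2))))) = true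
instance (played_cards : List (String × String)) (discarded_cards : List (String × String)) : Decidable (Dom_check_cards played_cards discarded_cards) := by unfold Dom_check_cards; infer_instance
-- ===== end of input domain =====

-- B replaces A's recursion by a while loop over a reversed copy (simpler decomposition);
-- A mutates both argument lists in place — the equivalence proved here is about the
-- RETURN value (B performs the same final mutations in Python).

-- ===== PORT A =====
def check_cards (played_cards : List (String × String)) (discarded_cards : List (String × String)) : (List (String × String)) × (List (String × String)) :=
  if _h : played_cards.length ≥ 4 then
    let last_card := PySem.List.pyGetD played_cards (-1) ("", "")
    let fourth_card := PySem.List.pyGetD played_cards (-4) ("", "")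
    if last_card.2 == fourth_card.2 then
      let d := discarded_cards
        ++ [PySem.List.pyGetD played_cards (-4) ("", ""),
            PySem.List.pyGetD played_cards (-3) ("", ""),
            PySem.List.pyGetD played_cards (-2) ("", ""),
            PySem.List.pyGetD played_cards (-1) ("", "")]
      (PySem.List.slice played_cards none (some (-4)), d)
    else if last_card.1 == fourth_card.1 then
      let d := discarded_cards
        ++ [PySem.List.pyGetD played_cards (-3) ("", ""),
            PySem.List.pyGetD played_cards (-2) ("", "")]
      -- del played_cards[-3:-1]  = keep played_cards[:-3] ++ played_cards[-1:]
      let p := PySem.List.slice played_cards none (some (-3))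
               ++ PySem.List.slice played_cards (some (-1)) none
      check_cards p d
    else (played_cards, discarded_cards)
  else (played_cards, discarded_cards)
termination_by played_cards.length
decreasing_by
  rw [PySem.List.slice_to_neg_ofNat played_cards 3 (by omega), PySem.List.slice_from_neg_one]
  simp only [List.length_append, List.length_take, List.length_drop]
  omega

-- ===== PORT B =====
def ccLoop (rev : List (String × String)) (discarded : List (String × String)) : (List (String × String)) × (List (String × String)) :=
  match rev with
  | a :: b :: c :: f :: rest =>
    if a.2 == f.2 then (rest, discarded ++ [f, c, b, a])
    else if a.1 == f.1 then ccLoop (a :: f :: rest) (discarded ++ [c, b])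
    else (a :: b :: c :: f :: rest, discarded)
  | l => (l, discarded)
termination_by rev.length

def check_cards_alt (played_cards : List (String × String)) (discarded_cards : List (String × String)) : (List (String × String)) × (List (String × String)) :=
  let r := ccLoop played_cards.reverse discarded_cards
  (r.1.reverse, r.2)

-- ===== PRECONDITION & SPEC =====
def Spec_check_cards (played_cards : List (String × String)) (discarded_cards : List (String × String)) (out : (List (String × String)) × (List (String × String))) : Prop := out = check_cards_alt played_cards discarded_cards
instance (played_cards : List (String × String)) (discarded_cards : List (String × String)) (out : (List (String × String)) × (List (String × String))) : Decidable (Spec_check_cards played_cards discarded_cards out) := by unfold Spec_check_cards; infer_instance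

-- ===== CLAIM (what is proved, stated in full; the proofs are below) =====
def Claim_equal_check_cards : Prop := ∀ (played_cards : List (String × String)) (discarded_cards : List (String × String)), Dom_check_cards played_cards discarded_cards → Spec_check_cards played_cards discarded_cards (check_cards played_cards discarded_cards)

-- ===== LEMMAS AND PROOFS =====

-- negative indexing into R ++ [f, c, b, a] picks the four newest cards
theorem pyGetD_last4 (R : List (String × String)) (f c b a d : String × String) :
    PySem.List.pyGetD (R ++ [f, c, b, a]) (-1) d = a ∧
    PySem.List.pyGetD (R ++ [f, c, b, a]) (-2) d = b ∧
    PySem.List.pyGetD (R ++ [f, c, b, a]) (-3) d = c ∧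
    PySem.List.pyGetD (R ++ [f, c, b, a]) (-4) d = f := by
  have hl : (R ++ [f, c, b, a]).length = R.length + 4 := by simp
  refine ⟨?_, ?_, ?_, ?_⟩
  · rw [PySem.List.pyGetD_neg_ofNat _ 1 d (by omega) (by omega)]
    simp [hl, List.getElem_append_right]
  · rw [PySem.List.pyGetD_neg_ofNat _ 2 d (by omega) (by omega)]
    simp [hl, List.getElem_append_right]
  · rw [PySem.List.pyGetD_neg_ofNat _ 3 d (by omega) (by omega)]
    simp [hl, List.getElem_append_right]
  · rw [PySem.List.pyGetD_neg_ofNat _ 4 d (by omega) (by omega)]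
    simp [hl, List.getElem_append_right]

-- one unfolding of A's body when the list ends in the four cards f, c, b, a
theorem check_cards_step (R : List (String × String)) (f c b a : String × String) (d : List (String × String)) :
    check_cards (R ++ [f, c, b, a]) d =
      if a.2 == f.2 then (R, d ++ [f, c, b, a])
      else if a.1 == f.1 then check_cards (R ++ [f, a]) (d ++ [c, b])
      else (R ++ [f, c, b, a], d) := by
  have hl : (R ++ [f, c, b, a]).length = R.length + 4 := by simp
  obtain ⟨h1, h2, h3, h4⟩ := pyGetD_last4 R f c b a ("", "")
  rw [check_cards]
  rw [dif_pos (by omega)]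
  simp only [h1, h2, h3, h4]
  rw [PySem.List.slice_to_neg_ofNat _ 4 (by omega),
      PySem.List.slice_to_neg_ofNat _ 3 (by omega),
      PySem.List.slice_from_neg_one, hl]
  have ht4 : (R ++ [f, c, b, a]).take (R.length + 4 - 4) = R := by
    simp
  have ht3 : (R ++ [f, c, b, a]).take (R.length + 4 - 3) = R ++ [f] := by
    have h : R.length + 4 - 3 = R.length + 1 := by omega
    simp [h, List.take_append]
  have hd1 : (R ++ [f, c, b, a]).drop (R.length + 4 - 1) = [a] := by
    have h : R.length + 4 - 1 = R.length + 3 := by omega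
    simp [h, List.drop_append]
  rw [ht4, ht3, hd1]
  simp

theorem check_cards_eq_ccLoop (rev d : List (String × String)) :
    check_cards rev.reverse d = ((ccLoop rev d).1.reverse, (ccLoop rev d).2) := by
  fun_induction ccLoop rev d with
  | case1 d a b c f rest hnum =>
    have hr : (a :: b :: c :: f :: rest).reverse = rest.reverse ++ [f, c, b, a] := by simp
    rw [hr, check_cards_step, if_pos hnum]
  | case2 d a b c f rest hnum hsuite ih =>
    have hr : (a :: b :: c :: f :: rest).reverse = rest.reverse ++ [f, c, b, a] := by simp
    have hr2 : (a :: f :: rest).reverse = rest.reverse ++ [f, a] := by simp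
    rw [hr, check_cards_step, if_neg hnum, if_pos hsuite]
    rw [hr2] at ih
    exact ih
  | case3 d a b c f rest hnum hsuite =>
    have hr : (a :: b :: c :: f :: rest).reverse = rest.reverse ++ [f, c, b, a] := by simp
    rw [hr, check_cards_step, if_neg hnum, if_neg hsuite, ← hr]
  | case4 d l hshape =>
    rcases l with _ | ⟨a, _ | ⟨b, _ | ⟨c, _ | ⟨f, rest⟩⟩⟩⟩
    · rw [check_cards, dif_neg (by simp)]
    · rw [check_cards, dif_neg (by simp)]
    · rw [check_cards, dif_neg (by simp)]
    · rw [check_cards, dif_neg (by simp)]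
    · exact absurd rfl (hshape a b c f rest)

-- ===== VERDICT (by name: the statement is the Claim_ definition above) =====
theorem check_cards_spec : Claim_equal_check_cards := by
  intro p d _
  unfold Spec_check_cards check_cards_alt
  have := check_cards_eq_ccLoop p.reverse d
  rw [List.reverse_reverse] at this
  simp [this]
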